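-- pv_equiv track=rewrite | github.com/edgebips/baskets | baskets/csv_utils.py | csv_split_sections_with_titles
-- ===== SOURCE A (Python) =====
-- def csv_split_sections(rows):
--     """Given rows, split them in at empty lines.
--     This is useful for structured CSV files with multiple sections.
--
--     Args:
--       rows: A list of rows, which are themselves lists of strings.
--     Returns:
--       A list of sections, which are lists of rows, which are lists of strings.
--     """
--     sections = []
--     current_section = []
--     for row in rows:
--         if row:
--             current_section.append(row)
--         else:
--             sections.append(current_section)
--             current_section = []
--     if current_section:
--         sections.append(current_section)
--     return sections
--
-- def csv_split_sections_with_titles(rows):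
--     """Given a list of rows, split their sections. If the sections have single
--     column titles, consume those lines as their names and return a mapping of
--     section names.
--
--     This is useful for CSV files with multiple sections, where the separator is
--     a title. We use this to separate the multiple tables within the CSV files.
--
--     Args:
--       rows: A list of rows (list-of-strings).
--     Returns:
--      A list of lists of rows (list-of-strings).
--
--     """
--     sections_map = {}
--     for index, section in enumerate(csv_split_sections(rows)):
--         # Skip too short sections, cannot possibly be a title.
--         if len(section) < 2:
--             continue
--         if len(section[0]) == 1 and len(section[1]) != 1:
--             name = section[0][0]
--             section = section[1:]
--         else:
--             name = 'Section {}'.format(index)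
--         sections_map[name] = section
--     return sections_map
-- ===== SOURCE B (Python) =====
-- def csv_split_sections_with_titles(rows):
--     """Index-scanning version: find each section's boundaries by scanning
--     indices for blank rows and slice the section out of rows directly,
--     instead of accumulating rows into an intermediate list of sections."""
--     sections_map = {}
--     index = 0
--     pos = 0
--     n = len(rows)
--     while pos <= n:
--         end = pos
--         while end < n and rows[end]:
--             end += 1
--         section = rows[pos:end]
--         if len(section) >= 2:
--             if len(section[0]) == 1 and len(section[1]) != 1:
--                 sections_map[section[0][0]] = section[1:]
--             else:
--                 sections_map['Section {}'.format(index)] = section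
--         index += 1
--         pos = end + 1
--     return sections_map
-- ===== Notes on version B (the rewrite author's own statement) =====
-- stated objective: alternative
-- what changed: Replaces A's accumulate-rows-into-sections-then-enumerate design by index scanning: a two-level index loop locates each section's boundary positions (runs between blank rows) and slices the section straight out of rows, never building a row accumulator or the intermediate list of all sections.
import Mathlib
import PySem

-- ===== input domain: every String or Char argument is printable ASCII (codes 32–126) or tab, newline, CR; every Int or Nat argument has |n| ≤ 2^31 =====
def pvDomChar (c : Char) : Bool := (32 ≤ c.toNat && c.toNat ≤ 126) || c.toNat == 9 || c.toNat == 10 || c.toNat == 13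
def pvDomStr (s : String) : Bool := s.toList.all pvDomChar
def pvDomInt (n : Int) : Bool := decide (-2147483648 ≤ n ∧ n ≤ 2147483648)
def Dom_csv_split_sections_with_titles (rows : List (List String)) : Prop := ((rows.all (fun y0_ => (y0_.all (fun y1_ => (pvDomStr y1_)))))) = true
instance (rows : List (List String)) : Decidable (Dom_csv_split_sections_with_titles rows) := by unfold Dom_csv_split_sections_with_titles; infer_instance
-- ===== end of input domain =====

-- B replaces A's accumulate-then-enumerate design by an index scan that slices
-- each section out of rows at its boundary positions (objective: alternative).

-- ===== PORT A =====
-- loop body of csv_split_sections: state = (sections, current_section)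
def pvAStep (st : List (List (List String)) × List (List String)) (row : List String) :
    List (List (List String)) × List (List String) :=
  if row ≠ [] then (st.1, st.2 ++ [row]) else (st.1 ++ [st.2], ([] : List (List String)))

def csv_split_sections (rows : List (List String)) : List (List (List String)) :=
  let st := rows.foldl pvAStep ([], [])
  if st.2 ≠ [] then st.1 ++ [st.2] else st.1

-- loop body of A's enumerate loop over sections_map
def pvABody (m : PySem.Dict String (List (List String))) (p : Int × List (List String)) :
    PySem.Dict String (List (List String)) :=
  if p.2.length < 2 then m
  else
    match p.2 with
    | s0 :: s1 :: rest =>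
      if s0.length = 1 ∧ s1.length ≠ 1 then
        -- name = section[0][0]; s0 is nonempty here since len(s0) == 1
        m.insert (s0.headD "") (s1 :: rest)
      else m.insert ("Section " ++ PySem.Int.toStr p.1) (s0 :: s1 :: rest)
    | _ => m

def csv_split_sections_with_titles (rows : List (List String)) : List (String × List (List String)) :=
  ((PySem.List.enumerate (csv_split_sections rows)).foldl pvABody PySem.Dict.empty).items

-- ===== PORT B =====
-- the body of Source B's `if len(section) >= 2: ...` block (the len >= 2 guard is the two-cons match)
def pvFinalize (m : PySem.Dict String (List (List String))) (index : Int)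
    (sec : List (List String)) : PySem.Dict String (List (List String)) :=
  match sec with
  | s0 :: s1 :: rest =>
    if s0.length = 1 ∧ s1.length ≠ 1 then
      -- section[0][0]; s0 is nonempty here since len(s0) == 1
      m.insert (s0.headD "") (s1 :: rest)
    else m.insert ("Section " ++ PySem.Int.toStr index) (s0 :: s1 :: rest)
  | _ => m

-- inner while loop: `while end < n and rows[end]: end += 1`
-- (rows.getD e [] is exact for rows[e] because the guard ensures e < n)
def pvScanEnd (rows : List (List String)) (e : Nat) : Nat :=
  if h : e < rows.length ∧ rows.getD e [] ≠ [] then pvScanEnd rows (e + 1) else e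
termination_by rows.length - e
decreasing_by omega

theorem pvScanEnd_ge (rows : List (List String)) (e : Nat) : e ≤ pvScanEnd rows e := by
  induction e using pvScanEnd.induct (rows := rows) with
  | case1 e h ih => rw [pvScanEnd, dif_pos h]; omega
  | case2 e h => rw [pvScanEnd, dif_neg h]

-- outer while loop: `while pos <= n: ...`
def pvOuter (rows : List (List String)) (m : PySem.Dict String (List (List String)))
    (index : Int) (pos : Nat) : PySem.Dict String (List (List String)) :=
  if pos ≤ rows.length then
    -- end = pvScanEnd rows pos; section = rows[pos:end] (the slice); then finalise and advance
    pvOuter rows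
      (pvFinalize m index (PySem.List.slice rows (some (pos : Int)) (some ((pvScanEnd rows pos) : Int))))
      (index + 1) (pvScanEnd rows pos + 1)
  else m
termination_by rows.length + 1 - pos
decreasing_by have := pvScanEnd_ge rows pos; omega

def csv_split_sections_with_titles_alt (rows : List (List String)) : List (String × List (List String)) :=
  (pvOuter rows PySem.Dict.empty 0 0).items

-- ===== PRECONDITION & SPEC =====
def Spec_csv_split_sections_with_titles (rows : List (List String)) (out : List (String × List (List String))) : Prop := out = csv_split_sections_with_titles_alt rows
instance (rows : List (List String)) (out : List (String × List (List String))) : Decidable (Spec_csv_split_sections_with_titles rows out) := by unfold Spec_csv_split_sections_with_titles; infer_instance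

-- ===== CLAIM (what is proved, stated in full; the proofs are below) =====
def Claim_equal_csv_split_sections_with_titles : Prop := ∀ (rows : List (List String)), Dom_csv_split_sections_with_titles rows → Spec_csv_split_sections_with_titles rows (csv_split_sections_with_titles rows)

-- ===== LEMMAS AND PROOFS =====

-- the sections A's split produces from a pending partial section `cur` and remaining rows
def pvSplitAux (cur : List (List String)) (rows : List (List String)) : List (List (List String)) :=
  match rows with
  | [] => if cur ≠ [] then [cur] else []
  | r :: rs => if r ≠ [] then pvSplitAux (cur ++ [r]) rs else cur :: pvSplitAux [] rs

-- finalising a list of sections with consecutive indices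
def pvProc (m : PySem.Dict String (List (List String))) (i : Int)
    (ss : List (List (List String))) : PySem.Dict String (List (List String)) :=
  match ss with
  | [] => m
  | s :: rest => pvProc (pvFinalize m i s) (i + 1) rest

-- predicate "row is nonempty", as a Bool for takeWhile/dropWhile
def pvNE (r : List String) : Bool := !r.isEmpty

theorem pvSplit_eq_aux (rows : List (List String))
    (acc : List (List (List String))) (cur : List (List String)) :
    (if (rows.foldl pvAStep (acc, cur)).2 ≠ []
      then (rows.foldl pvAStep (acc, cur)).1 ++ [(rows.foldl pvAStep (acc, cur)).2]
      else (rows.foldl pvAStep (acc, cur)).1) = acc ++ pvSplitAux cur rows := by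
  induction rows generalizing acc cur with
  | nil =>
    simp only [List.foldl_nil, pvSplitAux]
    by_cases hc : cur = [] <;> simp [hc]
  | cons r rs ih =>
    rw [List.foldl_cons]
    by_cases hr : r = []
    · rw [show pvAStep (acc, cur) r = (acc ++ [cur], []) from by simp [pvAStep, hr]]
      rw [ih]
      simp [pvSplitAux, hr]
    · rw [show pvAStep (acc, cur) r = (acc, cur ++ [r]) from by simp [pvAStep, hr]]
      rw [ih]
      simp [pvSplitAux, hr]

theorem pvAbody_eq_finalize (m : PySem.Dict String (List (List String))) (i : Int)
    (s : List (List String)) : pvABody m (i, s) = pvFinalize m i s := by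
  match s with
  | [] => simp [pvABody, pvFinalize]
  | [s0] => simp [pvABody, pvFinalize]
  | s0 :: s1 :: rest => simp [pvABody, pvFinalize]

theorem pvEnum_foldl_eq_proc (ss : List (List (List String))) (i : Int)
    (m : PySem.Dict String (List (List String))) :
    (PySem.List.enumerate ss i).foldl pvABody m = pvProc m i ss := by
  induction ss generalizing i m with
  | nil => simp [PySem.List.enumerate_nil, pvProc]
  | cons s rest ih =>
    rw [PySem.List.enumerate_cons, List.foldl_cons, pvAbody_eq_finalize, ih, pvProc]

-- pvSplitAux, characterised by the first blank row (takeWhile/dropWhile split)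
theorem pvSplitAux_dropWhile_nil (rest : List (List String)) (cur : List (List String))
    (h : rest.dropWhile pvNE = []) :
    pvSplitAux cur rest =
      if cur ++ rest.takeWhile pvNE ≠ [] then [cur ++ rest.takeWhile pvNE] else [] := by
  induction rest generalizing cur with
  | nil => simp [pvSplitAux]
  | cons r rs ih =>
    by_cases hr : r = []
    · simp [List.dropWhile, pvNE, hr] at h
    · have hp : pvNE r = true := by simp [pvNE, hr]
      rw [List.dropWhile_cons_of_pos hp] at h
      rw [List.takeWhile_cons_of_pos hp]
      simp only [pvSplitAux, if_pos hr]
      rw [ih _ h]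
      simp

theorem pvSplitAux_dropWhile_cons (rest : List (List String)) (cur : List (List String))
    (b : List String) (rest' : List (List String))
    (h : rest.dropWhile pvNE = b :: rest') :
    pvSplitAux cur rest = (cur ++ rest.takeWhile pvNE) :: pvSplitAux [] rest' := by
  induction rest generalizing cur with
  | nil => simp [List.dropWhile] at h
  | cons r rs ih =>
    by_cases hr : r = []
    · have hp : pvNE r = false := by simp [pvNE, hr]
      rw [List.dropWhile_cons_of_neg (by simp [hp])] at h
      injection h with hb hrest
      subst hrest
      rw [List.takeWhile_cons_of_neg (by simp [hp])]
      simp [pvSplitAux, hr]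
    · have hp : pvNE r = true := by simp [pvNE, hr]
      rw [List.dropWhile_cons_of_pos hp] at h
      rw [List.takeWhile_cons_of_pos hp]
      simp only [pvSplitAux, if_pos hr]
      rw [ih _ h]
      simp

-- the inner while loop computes pos + (length of the nonempty-row run at pos)
theorem pvScanEnd_spec (rows : List (List String)) (e : Nat) :
    pvScanEnd rows e = e + ((rows.drop e).takeWhile pvNE).length := by
  induction e using pvScanEnd.induct (rows := rows) with
  | case1 e h ih =>
    rw [pvScanEnd, dif_pos h]
    obtain ⟨hlt, hne⟩ := h
    have hdrop : rows.drop e = rows[e] :: rows.drop (e + 1) := List.drop_eq_getElem_cons hlt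
    have hget : rows[e] ≠ [] := by
      rwa [List.getD_eq_getElem _ _ hlt] at hne
    rw [ih, hdrop, List.takeWhile_cons_of_pos (by simp [pvNE, hget])]
    simp; omega
  | case2 e h =>
    rw [pvScanEnd, dif_neg h]
    by_cases hlt : e < rows.length
    · have hne : rows.getD e [] = [] := by
        by_contra hc; exact h ⟨hlt, hc⟩
      have hdrop : rows.drop e = rows[e] :: rows.drop (e + 1) := List.drop_eq_getElem_cons hlt
      have hget : rows[e] = [] := by rwa [List.getD_eq_getElem _ _ hlt] at hne
      rw [hdrop, List.takeWhile_cons_of_neg (by simp [pvNE, hget])]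
      simp
    · rw [List.drop_eq_nil_of_le (by omega)]
      simp

theorem pvTake_len_takeWhile {α : Type} (p : α → Bool) (l : List α) :
    l.take ((l.takeWhile p).length) = l.takeWhile p := by
  induction l with
  | nil => simp
  | cons x xs ih =>
    by_cases hx : p x
    · simp [hx, ih]
    · simp [hx]

theorem pvDrop_len_takeWhile {α : Type} (p : α → Bool) (l : List α) :
    l.drop ((l.takeWhile p).length) = l.dropWhile p := by
  induction l with
  | nil => simp
  | cons x xs ih =>
    by_cases hx : p x
    · simp [hx, ih]
    · simp [hx]

-- B's outer loop from position pos equals finalising A's sections of the remaining rows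
theorem pvOuter_eq_proc (rows : List (List String))
    (m : PySem.Dict String (List (List String))) (idx : Int) (pos : Nat) :
    pvOuter rows m idx pos = pvProc m idx (pvSplitAux [] (rows.drop pos)) := by
  induction m, idx, pos using pvOuter.induct (rows := rows) with
  | case2 m idx pos h =>
    rw [pvOuter, if_neg h]
    rw [List.drop_eq_nil_of_le (by omega)]
    simp [pvSplitAux, pvProc]
  | case1 m idx pos h IH =>
    have he : pvScanEnd rows pos = pos + ((rows.drop pos).takeWhile pvNE).length :=
      pvScanEnd_spec rows pos
    have hsec : PySem.List.slice rows (some (pos : Int)) (some ((pvScanEnd rows pos) : Int))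
        = (rows.drop pos).takeWhile pvNE := by
      rw [he]
      rw [show ((pos + ((rows.drop pos).takeWhile pvNE).length : Nat) : Int)
            = ((pos : Nat) : Int) + ((((rows.drop pos).takeWhile pvNE).length : Nat) : Int) from by
        push_cast; ring]
      rw [PySem.List.slice_natCast_add]
      exact pvTake_len_takeWhile pvNE (rows.drop pos)
    have hdropc : rows.drop (pvScanEnd rows pos + 1)
        = ((rows.drop pos).dropWhile pvNE).drop 1 := by
      rw [← pvDrop_len_takeWhile pvNE (rows.drop pos), List.drop_drop, List.drop_drop, he]
      congr 1
    rw [pvOuter, if_pos h]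
    show pvOuter rows
        (pvFinalize m idx (PySem.List.slice rows (some (pos : Int)) (some ((pvScanEnd rows pos) : Int))))
        (idx + 1) (pvScanEnd rows pos + 1)
      = pvProc m idx (pvSplitAux [] (rows.drop pos))
    rw [IH, hsec, hdropc]
    cases hdwc : (rows.drop pos).dropWhile pvNE with
    | nil =>
      rw [pvSplitAux_dropWhile_nil _ [] hdwc]
      simp only [List.nil_append, List.drop_nil]
      by_cases htwnil : (rows.drop pos).takeWhile pvNE = []
      · simp [htwnil, pvSplitAux, pvProc, pvFinalize]
      · simp [htwnil, pvSplitAux, pvProc]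
    | cons b rest' =>
      rw [pvSplitAux_dropWhile_cons _ [] b rest' hdwc]
      simp [pvProc]

-- ===== VERDICT (by name: the statement is the Claim_ definition above) =====
theorem csv_split_sections_with_titles_spec : Claim_equal_csv_split_sections_with_titles := by
  intro rows _
  unfold Spec_csv_split_sections_with_titles
  unfold csv_split_sections_with_titles csv_split_sections_with_titles_alt csv_split_sections
  dsimp only
  rw [pvEnum_foldl_eq_proc, pvSplit_eq_aux rows [] [], pvOuter_eq_proc]
  simp
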